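-- pv_equiv track=rewrite | github.com/hamiltonparker/learning | HNFGen.py | body_ortho_4
-- ===== SOURCE A (Python) =====
-- import copy
--
-- def find_HNF_diagonal(size):
--
--     """Generats allowable values for the diagonal of an HNF
--        given a particular size
--
--     Args:
--         size (int): The determinate of the HNF matricies
--
--     Returns:
--         diags_list (list, int): a list of allowable values for a given size
--     """
--
--     diags_list = []
--     for i in range(size):
--         a = i + 1
--         if (size / a) % 1 == 0:
--             for j in range(size // a):
--                 c = j + 1
--                 if (size / a / c) % 1 == 0:
--                     f = size // a // c
--                     diags_list.append([a,c,f])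
--     return diags_list
--
-- def body_ortho_4 (size):
--
--     """Generates symmetry preserving HNF's of a given size
--        for a body centered orthogonal basis
--
--     Args:
--         size (int): The determinate of the HNF matricies
--
--     Returns:
--         list (int): The generated HNF matricies
--     """
--
--     symHNF = []
--     diags = find_HNF_diagonal(size)
--     for i in diags:
--         a = i[0]
--         c = i[1]
--         f = i[2]
--         for j in range(c):
--             b = j
--             if ((a + 2 * b) / c) % 1 == 0:
--                 for k in range(f):
--                     d = k
--                     if ((a + 2 * d) / f) % 1 == 0:
--                         for l in range(f):
--                             e = l
--                             if (2 * e / f) % 1 == 0: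
--                                 if (((a + 2 * b) * e) / (c * f)) % 1 == 0:
--                                     symHNF.append(copy.deepcopy([[a,0,0], [b,c,0], [d,e,f]]))
--     return symHNF
-- ===== SOURCE B (Python) =====
-- def _cong2(a, m):
--     # sorted solutions x in [0, m) of  m | a + 2*x :
--     # 2*x mod m must equal r = (-a) % m, and 0 <= 2*x < 2*m forces 2*x in {r, r+m}
--     r = (-a) % m
--     sols = []
--     if r % 2 == 0:
--         sols.append(r // 2)
--     if (r + m) % 2 == 0:
--         sols.append((r + m) // 2)
--     return sols
--
-- def body_ortho_4(size):
--     symHNF = []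
--     for a in range(1, size + 1):
--         if size % a == 0:
--             n = size // a
--             for c in range(1, n + 1):
--                 if n % c == 0:
--                     f = n // c
--                     for b in _cong2(a, c):
--                         for d in _cong2(a, f):
--                             for e in _cong2(0, f):
--                                 if ((a + 2 * b) * e) % (c * f) == 0:
--                                     symHNF.append([[a, 0, 0], [b, c, 0], [d, e, f]])
--     return symHNF
-- ===== Notes on version B (the rewrite author's own statement) =====
-- stated objective: faster
-- what changed: Instead of scanning all b in range(c), d in range(f) and e in range(f) and testing each divisibility condition, B solves each congruence m | a+2x directly: the at-most-two solutions in [0,m) are (r)/2 and (r+m)/2 for r=(-a)%m when even, so the three inner scans are replaced by constant-size candidate lists; the diagonal search is folded into the same pass.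
import Mathlib
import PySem

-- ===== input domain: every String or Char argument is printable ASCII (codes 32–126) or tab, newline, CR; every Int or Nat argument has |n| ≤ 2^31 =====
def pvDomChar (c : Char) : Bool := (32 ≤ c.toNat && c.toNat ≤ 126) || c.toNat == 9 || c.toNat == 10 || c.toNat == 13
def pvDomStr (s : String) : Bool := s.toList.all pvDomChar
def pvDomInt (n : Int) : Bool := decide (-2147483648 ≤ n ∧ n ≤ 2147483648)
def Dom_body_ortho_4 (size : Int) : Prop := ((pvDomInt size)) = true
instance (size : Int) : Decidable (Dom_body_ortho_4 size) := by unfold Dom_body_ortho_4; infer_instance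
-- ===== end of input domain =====

-- B replaces A's three inner scans (over range(c), range(f), range(f)) by the at-most-two direct
-- solutions of each congruence m | a+2x, making the per-diagonal work constant-size (objective: faster).

-- ===== PORT A =====
-- A's float tests '(x / y) % 1 == 0' are integer-divisibility tests; exact on Dom (|size| ≤ 2^31 < 2^53).
def find_HNF_diagonal (size : Int) : List (List Int) :=
  (PySem.List.pyRange 0 size 1).foldl (fun dl i =>
    let a := i + 1
    if PySem.Int.mod size a == 0 then
      (PySem.List.pyRange 0 (PySem.Int.floordiv size a) 1).foldl (fun dl2 j =>
        let c := j + 1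
        if PySem.Int.mod (PySem.Int.floordiv size a) c == 0 then
          dl2 ++ [[a, c, PySem.Int.floordiv (PySem.Int.floordiv size a) c]]
        else dl2) dl
    else dl) []

-- i[0], i[1], i[2] are read with pyGetD; each i is a 3-list [a,c,f], so Python's i[k] never raises here.
def body_ortho_4 (size : Int) : List (List (List Int)) :=
  (find_HNF_diagonal size).foldl (fun acc i =>
    let a := PySem.List.pyGetD i 0 0
    let c := PySem.List.pyGetD i 1 0
    let f := PySem.List.pyGetD i 2 0
    (PySem.List.pyRange 0 c 1).foldl (fun acc2 b =>
      if PySem.Int.mod (a + 2*b) c == 0 then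
        (PySem.List.pyRange 0 f 1).foldl (fun acc3 d =>
          if PySem.Int.mod (a + 2*d) f == 0 then
            (PySem.List.pyRange 0 f 1).foldl (fun acc4 e =>
              if PySem.Int.mod (2*e) f == 0 then
                if PySem.Int.mod ((a + 2*b)*e) (c*f) == 0 then
                  acc4 ++ [[[a,0,0],[b,c,0],[d,e,f]]]
                else acc4
              else acc4) acc3
          else acc3) acc2
      else acc2) acc) []

-- ===== PORT B =====
-- the sorted solutions x in [0, m) of  m | a + 2*x  (Source B's _cong2)
def cong2 (a m : Int) : List Int :=
  let r := PySem.Int.mod (-a) m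
  (if PySem.Int.mod r 2 == 0 then [PySem.Int.floordiv r 2] else []) ++
  (if PySem.Int.mod (r + m) 2 == 0 then [PySem.Int.floordiv (r + m) 2] else [])

def body_ortho_4_alt (size : Int) : List (List (List Int)) :=
  (PySem.List.pyRange 1 (size + 1) 1).foldl (fun acc a =>
    if PySem.Int.mod size a == 0 then
      (let n := PySem.Int.floordiv size a
      (PySem.List.pyRange 1 (n + 1) 1).foldl (fun acc2 c =>
        if PySem.Int.mod n c == 0 then
          (let f := PySem.Int.floordiv n c
          (cong2 a c).foldl (fun acc3 b =>
            (cong2 a f).foldl (fun acc4 d =>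
              (cong2 0 f).foldl (fun acc5 e =>
                if PySem.Int.mod ((a + 2*b) * e) (c * f) == 0 then
                  acc5 ++ [[[a,0,0],[b,c,0],[d,e,f]]]
                else acc5) acc4) acc3) acc2)
        else acc2) acc)
    else acc) []

-- ===== PRECONDITION & SPEC =====
def Spec_body_ortho_4 (size : Int) (out : List (List (List Int))) : Prop := out = body_ortho_4_alt size
instance (size : Int) (out : List (List (List Int))) : Decidable (Spec_body_ortho_4 size out) := by unfold Spec_body_ortho_4; infer_instance

-- ===== CLAIM (what is proved, stated in full; the proofs are below) =====
def Claim_equal_body_ortho_4 : Prop := ∀ (size : Int), Dom_body_ortho_4 size → Spec_body_ortho_4 size (body_ortho_4 size)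

-- ===== LEMMAS AND PROOFS =====

-- 'if c: out += w' is 'out ++ (if c: w else [])'
theorem appIf {β : Type} (Q : Bool) (acc w : List β) :
    (if Q then acc ++ w else acc) = acc ++ (if Q then w else []) := by
  split <;> simp

theorem flatMap_if_filter {α β : Type} (l : List α) (p : α → Bool) (G : α → List β) :
    l.flatMap (fun x => if p x then G x else []) = (l.filter p).flatMap G := by
  induction l with
  | nil => simp
  | cons y ys ih => by_cases h : p y <;> simp [h, ih]

-- cong2 a m holds exactly the x in [0, m) with m | a + 2*x
theorem mem_cong2 {a m x : Int} (hm : 0 < m) :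
    x ∈ cong2 a m ↔ (0 ≤ x ∧ x < m ∧ m ∣ (a + 2*x)) := by
  have h2 : (0:Int) < 2 := two_pos
  have hr0 : 0 ≤ (-a) % m := Int.emod_nonneg _ (by omega)
  have hrm : (-a) % m < m := Int.emod_lt_of_pos _ hm
  have hdvd : m ∣ a + (-a) % m := ⟨-((-a) / m), by rw [Int.emod_def]; ring⟩
  rw [cong2]
  simp only [PySem.Int.mod_eq_emod_of_pos h2, PySem.Int.mod_eq_emod_of_pos hm,
    PySem.Int.floordiv_eq_ediv_of_pos h2, List.mem_append]
  constructor
  · rintro (hx | hx)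
    · split at hx
      case isFalse => simp at hx
      case isTrue h =>
        simp only [List.mem_singleton] at hx
        simp only [beq_iff_eq] at h
        refine ⟨by omega, by omega, ?_⟩
        have : a + 2*x = a + (-a) % m := by omega
        rw [this]; exact hdvd
    · split at hx
      case isFalse => simp at hx
      case isTrue h =>
        simp only [List.mem_singleton] at hx
        simp only [beq_iff_eq] at h
        refine ⟨by omega, by omega, ?_⟩
        have : a + 2*x = (a + (-a) % m) + m := by omega
        rw [this]; exact dvd_add hdvd dvd_rfl
  · rintro ⟨hx0, hxm, hd⟩
    have hsub : m ∣ 2*x - (-a) % m := by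
      have h := Int.dvd_sub hd hdvd
      have heq : a + 2 * x - (a + (-a) % m) = 2*x - (-a) % m := by ring
      rwa [heq] at h
    rcases hsub with ⟨k, hkk⟩
    have hk2 : k < 2 := by
      refine Int.lt_of_mul_lt_mul_left (a := m) ?_ (by omega)
      omega
    have hk0 : -1 < k := by
      refine Int.lt_of_mul_lt_mul_left (a := m) ?_ (by omega)
      omega
    interval_cases k
    · left
      have h2x : 2 * x = (-a) % m := by omega
      have hc : ((-a) % m % 2 == 0) = true := by simp; omega
      rw [if_pos hc]
      simp; omega
    · right
      have h2x : 2 * x = (-a) % m + m := by omega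
      have hc : (((-a) % m + m) % 2 == 0) = true := by simp; omega
      rw [if_pos hc]
      simp; omega

theorem pairwise_cong2 (a m : Int) (hm : 0 < m) : (cong2 a m).Pairwise (· < ·) := by
  have h2 : (0:Int) < 2 := two_pos
  rw [cong2]
  simp only [PySem.Int.mod_eq_emod_of_pos h2, PySem.Int.mod_eq_emod_of_pos hm,
    PySem.Int.floordiv_eq_ediv_of_pos h2]
  have hr0 : 0 ≤ (-a) % m := Int.emod_nonneg _ (by omega)
  split <;> split <;> (simp_all; try omega)

-- A's scan of range(m) filtered by m | a+2x IS cong2 a m (in the same, increasing, order)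
theorem scan_eq_cong2 (a m : Int) (hm : 0 < m) :
    (PySem.List.pyRange 0 m 1).filter (fun x => PySem.Int.mod (a + 2*x) m == 0) = cong2 a m := by
  have hps := List.Pairwise.filter (l := PySem.List.pyRange 0 m 1)
    (p := fun x => PySem.Int.mod (a + 2*x) m == 0) (PySem.List.pairwise_lt_pyRange_one 0 m)
  have hpc := pairwise_cong2 a m hm
  refine List.Perm.eq_of_pairwise' (hps.imp le_of_lt) (hpc.imp le_of_lt) ?_
  refine (List.perm_ext_iff_of_nodup (hps.imp ?_) (hpc.imp ?_)).mpr ?_ <;>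
    try exact fun h => ne_of_lt h
  intro x
  simp only [List.mem_filter, PySem.List.mem_pyRange_one, mem_cong2 hm, beq_iff_eq,
    PySem.Int.mod_eq_zero_iff_dvd]
  tauto

theorem pyGetD_t0 {α : Type} (x y z d : α) : PySem.List.pyGetD [x,y,z] 0 d = x := rfl
theorem pyGetD_t1 {α : Type} (x y z d : α) : PySem.List.pyGetD [x,y,z] 1 d = y := rfl
theorem pyGetD_t2 {α : Type} (x y z d : α) : PySem.List.pyGetD [x,y,z] 2 d = z := rfl

theorem fd_pos {n d : Int} (hn : 0 < n) (hd : 0 < d) (h : d ∣ n) : 0 < PySem.Int.floordiv n d := by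
  rw [PySem.Int.floordiv_eq_ediv_of_pos hd]
  rcases h with ⟨k, hk⟩
  have hk0 : 0 < k := by nlinarith
  rw [hk, Int.mul_ediv_cancel_left _ (ne_of_gt hd)]
  exact hk0

-- per-diagonal: A's three scans (normal form after loop-shape rewriting) = B's cong2 candidates
theorem diag_eq (a c f : Int) (hc : 0 < c) (hf : 0 < f) :
    List.flatMap
      (fun b =>
        if (PySem.Int.mod (a + 2 * b) c == 0) = true then
          List.flatMap
            (fun d =>
              if (PySem.Int.mod (a + 2 * d) f == 0) = true then
                List.flatMap
                  (fun e =>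
                    if (PySem.Int.mod (2 * e) f == 0) = true then
                      if (PySem.Int.mod ((a + 2 * b) * e) (c * f) == 0) = true then
                        [[[a, 0, 0], [b, c, 0], [d, e, f]]]
                      else []
                    else [])
                  (PySem.List.pyRange 0 f 1)
              else [])
            (PySem.List.pyRange 0 f 1)
        else [])
      (PySem.List.pyRange 0 c 1)
    = List.flatMap
        (fun b =>
          List.flatMap
            (fun d =>
              List.flatMap
                (fun e =>
                  if (PySem.Int.mod ((a + 2 * b) * e) (c * f) == 0) = true then
                    [[[a, 0, 0], [b, c, 0], [d, e, f]]]
                  else [])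
                (cong2 0 f))
            (cong2 a f))
        (cong2 a c) := by
  rw [flatMap_if_filter, scan_eq_cong2 a c hc]
  apply List.flatMap_congr; intro b _
  rw [flatMap_if_filter, scan_eq_cong2 a f hf]
  apply List.flatMap_congr; intro d _
  rw [flatMap_if_filter]
  rw [show (fun e : Int => PySem.Int.mod (2*e) f == 0) = (fun e : Int => PySem.Int.mod (0 + 2*e) f == 0) by funext e; rw [zero_add]]
  rw [scan_eq_cong2 0 f hf]

theorem main_eq (size : Int) : body_ortho_4 size = body_ortho_4_alt size := by
  have hrg : ∀ t : Int, PySem.List.pyRange 1 (t+1) 1 = (PySem.List.pyRange 0 t 1).map (fun i => i+1) := by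
    intro t
    simp only [PySem.List.pyRange_one, List.map_map, add_sub_cancel_right, sub_zero]
    apply List.map_congr_left
    intro k _
    simp
    ring
  simp only [body_ortho_4, body_ortho_4_alt, find_HNF_diagonal, hrg, appIf,
    PySem.List.foldl_append_eq_flatMap, List.nil_append, List.flatMap_map, List.flatMap_assoc]
  apply List.flatMap_congr
  intro i hi
  obtain ⟨hi0, hisz⟩ := PySem.List.mem_pyRange_one.mp hi
  split
  case isFalse => simp
  case isTrue h =>
    have hdvd : (i+1) ∣ size := by
      rw [beq_iff_eq, PySem.Int.mod_eq_zero_iff_dvd] at h; exact h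
    have hnpos : 0 < PySem.Int.floordiv size (i+1) := fd_pos (by omega) (by omega) hdvd
    rw [List.flatMap_assoc]
    apply List.flatMap_congr
    intro j hj
    obtain ⟨hj0, hjn⟩ := PySem.List.mem_pyRange_one.mp hj
    split
    case isFalse => simp
    case isTrue hq =>
      have hcdvd : (j+1) ∣ PySem.Int.floordiv size (i+1) := by
        rw [beq_iff_eq, PySem.Int.mod_eq_zero_iff_dvd] at hq; exact hq
      have hfpos : 0 < PySem.Int.floordiv (PySem.Int.floordiv size (i+1)) (j+1) :=
        fd_pos hnpos (by omega) hcdvd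
      simp only [List.flatMap_cons, List.flatMap_nil, List.append_nil, pyGetD_t0, pyGetD_t1, pyGetD_t2]
      exact diag_eq (i+1) (j+1) _ (by omega) hfpos

-- ===== VERDICT (by name: the statement is the Claim_ definition above) =====
theorem body_ortho_4_spec : Claim_equal_body_ortho_4 := by
  intro size _
  unfold Spec_body_ortho_4
  exact main_eq size
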